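-- pv_equiv track=rewrite | github.com/Jela8561/Jela8561.github.io | python/test.py | distinct_arrangements
-- ===== SOURCE A (Python) =====
-- import math
--
-- def distinct_arrangements(word):
--     # Calculate the total number of letters
--     total_letters = len(word)
--
--     # Create a dictionary to store the frequency of each letter
--     letter_count = {}
--     for letter in word:
--         if letter in letter_count:
--             letter_count[letter] += 1
--         else:
--             letter_count[letter] = 1
--
--     # Calculate the denominator (product of factorials of the frequencies)
--     denominator = 1
--     for count in letter_count.values():
--         denominator *= math.factorial(count)
--
--     # Calculate the number of distinct arrangements
--     num_arrangements = math.factorial(total_letters) // denominator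
--
--     return num_arrangements
-- ===== SOURCE B (Python) =====
-- import math
--
-- def distinct_arrangements(word):
--     # Count letter frequencies.
--     letter_count = {}
--     for letter in word:
--         letter_count[letter] = letter_count.get(letter, 0) + 1
--     # Multinomial via incremental binomials: n!/(k1!...km!) = prod C(placed, ki).
--     placed = 0
--     result = 1
--     for count in letter_count.values():
--         placed += count
--         result *= math.comb(placed, count)
--     return result
-- ===== Notes on version B (the rewrite author's own statement) =====
-- stated objective: alternative
-- what changed: Replaces the closed-form factorial(n) // product-of-factorials division with an accumulating loop of binomial coefficients using the identity n!/(prod k_i!) = prod C(running_total, k_i), so no division and no full-length factorial is ever formed.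
import Mathlib
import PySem

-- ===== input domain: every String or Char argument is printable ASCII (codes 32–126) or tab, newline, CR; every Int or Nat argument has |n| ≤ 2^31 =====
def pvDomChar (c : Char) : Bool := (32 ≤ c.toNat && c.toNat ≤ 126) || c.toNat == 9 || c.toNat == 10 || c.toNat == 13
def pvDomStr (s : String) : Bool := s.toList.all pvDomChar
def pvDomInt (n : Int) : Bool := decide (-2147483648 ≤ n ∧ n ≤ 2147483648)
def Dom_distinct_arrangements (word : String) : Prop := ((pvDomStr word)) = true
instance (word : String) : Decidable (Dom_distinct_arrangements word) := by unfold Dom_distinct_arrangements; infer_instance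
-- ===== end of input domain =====

-- B replaces A's factorial(n) // product-of-factorials division by an accumulating product of
-- binomial coefficients (n!/(∏kᵢ!) = ∏ C(running_total, kᵢ)) — an alternative decomposition.

-- ===== PORT A =====
-- math.factorial(k) for the nonnegative ints arising here is Nat.factorial; exact since
-- total_letters = len(word) ≥ 0 and every stored count is ≥ 1.
def distinct_arrangements (word : String) : Int :=
  let total_letters : Int := (word.toList.length : Int)
  let letter_count : PySem.Dict Char Int :=
    word.toList.foldl
      (fun d letter =>
        if d.contains letter then d.insert letter (d.getD letter 0 + 1)
        else d.insert letter 1)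
      PySem.Dict.empty
  let denominator : Int :=
    letter_count.values.foldl (fun acc count => acc * (Nat.factorial count.toNat : Int)) 1
  PySem.Int.floordiv (Nat.factorial total_letters.toNat : Int) denominator

-- ===== PORT B =====
-- math.comb(n, k) for the nonnegative ints arising here is Nat.choose; exact since
-- placed and count are always ≥ 0 (every stored count is ≥ 1).
def distinct_arrangements_alt (word : String) : Int :=
  let letter_count : PySem.Dict Char Int :=
    word.toList.foldl (fun d letter => d.insert letter (d.getD letter 0 + 1)) PySem.Dict.empty
  let st : Int × Int :=
    letter_count.values.foldl
      (fun (s : Int × Int) count =>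
        (s.1 + count, s.2 * (Nat.choose (s.1 + count).toNat count.toNat : Int)))
      (0, 1)
  st.2

-- ===== PRECONDITION & SPEC =====
def Spec_distinct_arrangements (word : String) (out : Int) : Prop := out = distinct_arrangements_alt word
instance (word : String) (out : Int) : Decidable (Spec_distinct_arrangements word out) := by unfold Spec_distinct_arrangements; infer_instance

-- ===== CLAIM (what is proved, stated in full; the proofs are below) =====
def Claim_equal_distinct_arrangements : Prop := ∀ (word : String), Dom_distinct_arrangements word → Spec_distinct_arrangements word (distinct_arrangements word)

-- ===== LEMMAS AND PROOFS =====

-- A's counting step (membership test, then += 1 or = 1) is pointwise the insert-getD step.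
theorem countStep_eq :
    (fun (d : PySem.Dict Char Int) letter =>
        if d.contains letter then d.insert letter (d.getD letter 0 + 1)
        else d.insert letter 1)
      = fun d letter => d.insert letter (d.getD letter 0 + 1) := by
  funext d c
  by_cases h : d.contains c = true
  · simp [h]
  · simp only [Bool.not_eq_true] at h
    simp [h, PySem.Dict.getD_of_not_contains d (0 : Int) h]

-- pure-Nat version of B's binomial loop
def binFold (p r : Nat) : List Nat → Nat
  | [] => r
  | c :: ks => binFold (p + c) (r * Nat.choose (p + c) c) ks

theorem binFold_cast (ns : List Nat) : ∀ (p r : Nat),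
    ((ns.map (fun (n : Nat) => (n : Int))).foldl
      (fun (s : Int × Int) count =>
        (s.1 + count, s.2 * (Nat.choose (s.1 + count).toNat count.toNat : Int)))
      ((p : Int), (r : Int))).2 = (binFold p r ns : Int) := by
  induction ns with
  | nil => intro p r; simp [binFold]
  | cons c ks ih =>
    intro p r
    have h1 : ((p : Int) + (c : Int)).toNat = p + c := by omega
    have h2 : ((c : Int)).toNat = c := by omega
    simp only [List.map_cons, List.foldl_cons, binFold, h1, h2]
    have := ih (p + c) (r * Nat.choose (p + c) c)
    push_cast at this ⊢
    exact this

-- the key multinomial identity, division-free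
theorem binFold_mul (ns : List Nat) : ∀ (p r : Nat),
    binFold p r ns * (ns.map Nat.factorial).prod * Nat.factorial p
      = Nat.factorial (p + ns.sum) * r := by
  induction ns with
  | nil => intro p r; simp [binFold]; ring
  | cons c ks ih =>
    intro p r
    simp only [binFold, List.map_cons, List.prod_cons, List.sum_cons]
    have hch : Nat.choose (p + c) c * Nat.factorial c * Nat.factorial p
        = Nat.factorial (p + c) := by
      have := Nat.choose_mul_factorial_mul_factorial (Nat.le_add_left c p)
      simpa [Nat.add_sub_cancel] using this
    have key := ih (p + c) (r * Nat.choose (p + c) c)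
    apply Nat.eq_of_mul_eq_mul_right (Nat.factorial_pos (p + c))
    have hS : p + (c + ks.sum) = p + c + ks.sum := by omega
    rw [hS]
    calc binFold (p + c) (r * Nat.choose (p + c) c) ks
            * (Nat.factorial c * (ks.map Nat.factorial).prod) * Nat.factorial p
            * Nat.factorial (p + c)
        = (binFold (p + c) (r * Nat.choose (p + c) c) ks
            * (ks.map Nat.factorial).prod * Nat.factorial (p + c))
            * (Nat.factorial c * Nat.factorial p) := by ring
      _ = (Nat.factorial (p + c + ks.sum) * (r * Nat.choose (p + c) c))
            * (Nat.factorial c * Nat.factorial p) := by rw [key]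
      _ = Nat.factorial (p + c + ks.sum) * r
            * (Nat.choose (p + c) c * Nat.factorial c * Nat.factorial p) := by ring
      _ = Nat.factorial (p + c + ks.sum) * r * Nat.factorial (p + c) := by rw [hch]

-- A's denominator loop is the cast of the Nat product of factorials.
theorem denom_cast (ns : List Nat) : ∀ (acc : Nat),
    ((ns.map (fun (n : Nat) => (n : Int))).foldl
      (fun acc count => acc * (Nat.factorial count.toNat : Int)) (acc : Int))
      = ((acc * (ns.map Nat.factorial).prod : Nat) : Int) := by
  induction ns with
  | nil => intro acc; simp
  | cons c ks ih =>
    intro acc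
    simp only [List.map_cons, List.foldl_cons, Int.toNat_natCast]
    rw [show ((acc : Int) * (Nat.factorial c : Int)) = ((acc * Nat.factorial c : Nat) : Int) by push_cast; ring]
    rw [ih (acc * Nat.factorial c)]
    push_cast [List.prod_cons]
    ring

-- the counts stored in the counter sum to the word's length
theorem sum_counts_eq_length (xs : List Char) :
    ((PySem.Set.ofList xs).map (fun k => xs.count k)).sum = xs.length := by
  have hperm : (PySem.Set.ofList xs).Perm xs.dedup := by
    rw [List.perm_ext_iff_of_nodup (PySem.Set.nodup_ofList xs) xs.nodup_dedup]
    intro a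
    simp [PySem.Set.mem_ofList, List.mem_dedup]
  have := (hperm.map (fun k => xs.count k)).sum_eq
  rw [this]
  exact List.sum_map_count_dedup_eq_length xs

-- ===== VERDICT (by name: the statement is the Claim_ definition above) =====
theorem distinct_arrangements_spec : Claim_equal_distinct_arrangements := by
  intro word _
  unfold Spec_distinct_arrangements distinct_arrangements distinct_arrangements_alt
  rw [countStep_eq]
  set xs := word.toList with hxs
  rw [PySem.Dict.foldl_insert_getD_add_one_eq_counter]
  simp only []
  -- the counter's values list, as casts of Nat counts
  set ns : List Nat := (PySem.Set.ofList xs).map (fun k => xs.count k) with hns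
  have hvals : (PySem.Dict.counter xs).values = ns.map (fun (n : Nat) => (n : Int)) := by
    rw [PySem.Dict.values_eq_map_keys _ (PySem.Dict.nodup_keys_counter xs) 0]
    simp [PySem.Dict.keys_counter, PySem.Dict.getD_counter, hns, List.map_map, Function.comp]
  rw [hvals]
  rw [show ((0 : Int), (1 : Int)) = (((0 : Nat) : Int), ((1 : Nat) : Int)) by norm_num]
  rw [binFold_cast ns 0 1]
  rw [show (1 : Int) = ((1 : Nat) : Int) by norm_num]
  rw [denom_cast ns 1]
  have hmul : binFold 0 1 ns * (ns.map Nat.factorial).prod = Nat.factorial ns.sum := by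
    have := binFold_mul ns 0 1
    simpa using this
  have hlen : ((xs.length : Int)).toNat = xs.length := by omega
  rw [hlen]
  have hsum : ns.sum = xs.length := sum_counts_eq_length xs
  have hDpos : 0 < (ns.map Nat.factorial).prod := by
    apply List.prod_pos
    intro x hx
    obtain ⟨n, _, rfl⟩ := List.mem_map.mp hx
    exact Nat.factorial_pos n
  rw [show Nat.factorial xs.length = binFold 0 1 ns * (ns.map Nat.factorial).prod by
    rw [hmul, hsum]]
  rw [Nat.one_mul, PySem.Int.floordiv_natCast]
  rw [Nat.mul_div_cancel _ hDpos]
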